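-- pv_equiv track=rewrite | github.com/norrietaylor/distillery | src/distillery/feeds/poller.py | build_keyword_map
-- ===== SOURCE A (Python) =====
-- def build_keyword_map(vocabulary: dict[str, int]) -> dict[str, str]:
--     """Build a keyword-to-tag-path map from a tag vocabulary.
--
--     For each tag in *vocabulary*:
--
--     - Extracts the leaf segment (the last ``/``-separated part).
--     - Maps the leaf directly to the full tag path.
--     - Splits hyphenated leaves into individual words and maps each word longer
--       than 3 characters to the full tag path.
--
--     When two tags produce the same keyword, the one with the higher occurrence
--     count (or alphabetically first on tie) wins.
--
--     Args:
--         vocabulary: Mapping of full tag path → occurrence count, as returned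
--             by :meth:`~distillery.store.protocol.DistilleryStore.get_tag_vocabulary`.
--
--     Returns:
--         A dict mapping lowercase keyword strings to full tag paths.
--
--     Example::
--
--         vocab = {"domain/authentication": 5, "supply-chain-security": 2}
--         kw_map = build_keyword_map(vocab)
--         # kw_map["authentication"]    == "domain/authentication"
--         # kw_map["supply"]            == "supply-chain-security"
--         # kw_map["chain"]             == "supply-chain-security"
--         # kw_map["security"]          == "supply-chain-security"
--     """
--     # keyword -> (full_tag_path, occurrence_count)
--     best: dict[str, tuple[str, int]] = {}
--
--     for tag, count in vocabulary.items():
--         # Skip Tier-1 source tags — they're applied via _derive_source_tags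
--         if tag.startswith("source/"):
--             continue
--         leaf = tag.rsplit("/", 1)[-1]
--         keywords: list[str] = [leaf]
--         # Split hyphenated leaf and keep words longer than 3 chars
--         for word in leaf.split("-"):
--             if len(word) > 3:
--                 keywords.append(word)
--
--         for kw in keywords:
--             kw_lower = kw.lower()
--             if kw_lower not in best:
--                 best[kw_lower] = (tag, count)
--             else:
--                 existing_tag, existing_count = best[kw_lower]
--                 # Higher count wins; alphabetical ordering breaks ties
--                 if count > existing_count or (count == existing_count and tag < existing_tag):
--                     best[kw_lower] = (tag, count)
--
--     return {kw: tag for kw, (tag, _) in best.items()}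
-- ===== SOURCE B (Python) =====
-- def build_keyword_map(vocabulary: dict[str, int]) -> dict[str, str]:
--     """Group every (tag, count) candidate per keyword, then pick each group's
--     minimum under the key (-count, tag) — i.e. highest count, alphabetically
--     first tag on ties."""
--
--     def keywords(leaf: str) -> list[str]:
--         return [leaf] + [w for w in leaf.split("-") if len(w) > 3]
--
--     groups: dict[str, list[tuple[str, int]]] = {}
--     for tag, count in vocabulary.items():
--         if not tag.startswith("source/"):
--             for kw in keywords(tag.rsplit("/", 1)[-1]):
--                 groups.setdefault(kw.lower(), []).append((tag, count))
--
--     return {kw: min(pairs, key=lambda tc: (-tc[1], tc[0]))[0]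
--             for kw, pairs in groups.items()}
-- ===== Notes on version B (the rewrite author's own statement) =====
-- stated objective: alternative
-- what changed: Instead of a single pass maintaining the best (tag,count) per keyword with an inline comparison, B groups all (tag,count) candidates per keyword into a multimap and then takes each group's minimum under the key (-count, tag).
import Mathlib
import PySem

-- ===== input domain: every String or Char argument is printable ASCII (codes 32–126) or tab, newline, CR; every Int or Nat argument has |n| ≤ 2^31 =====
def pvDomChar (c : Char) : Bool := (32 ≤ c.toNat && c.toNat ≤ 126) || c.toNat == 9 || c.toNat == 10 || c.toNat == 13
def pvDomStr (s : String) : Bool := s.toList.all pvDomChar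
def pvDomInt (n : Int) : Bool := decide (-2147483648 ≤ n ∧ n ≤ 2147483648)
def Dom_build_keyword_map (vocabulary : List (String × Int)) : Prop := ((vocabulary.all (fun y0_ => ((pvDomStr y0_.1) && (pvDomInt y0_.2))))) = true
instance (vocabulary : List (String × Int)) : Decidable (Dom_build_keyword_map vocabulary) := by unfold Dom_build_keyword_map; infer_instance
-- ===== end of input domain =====

-- B replaces A's running best-(tag,count)-per-keyword dict by a per-keyword multimap of all
-- candidates reduced with min under the key (-count, tag): an alternative decomposition, same cost.

-- ===== PORT A =====
-- A's loop body for one vocabulary item.  tag.rsplit("/", 1)[-1] is the last "/"-separated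
-- segment: ported as getLastD of split? (exact: split? with sep ≠ "" is some and never []).
def pvA_step (best : PySem.Dict String (String × Int)) (item : String × Int) :
    PySem.Dict String (String × Int) :=
  if PySem.Str.startswith item.1 "source/" then best
  else
    let leaf := ((PySem.Str.split? item.1 "/").getD []).getLastD ""
    let keywords := ((PySem.Str.split? leaf "-").getD []).foldl
      (fun ks w => if 3 < PySem.Str.len w then ks ++ [w] else ks) [leaf]
    keywords.foldl (fun b kw =>
      let kl := PySem.Str.lower kw
      if b.contains kl = false then b.insert kl (item.1, item.2)
      else
        let ex := b.getD kl ("", 0)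
        if item.2 > ex.2 ∨ (item.2 = ex.2 ∧ item.1 < ex.1) then b.insert kl (item.1, item.2)
        else b) best

def build_keyword_map (vocabulary : List (String × Int)) : List (String × String) :=
  let best := (PySem.Dict.ofList vocabulary).items.foldl pvA_step PySem.Dict.empty
  best.items.map (fun p => (p.1, p.2.1))

-- ===== PORT B =====
def pvB_keywords (leaf : String) : List String :=
  [leaf] ++ ((PySem.Str.split? leaf "-").getD []).filter (fun w => decide (3 < PySem.Str.len w))

def pvB_group (d : PySem.Dict String (List (String × Int))) (item : String × Int) :
    PySem.Dict String (List (String × Int)) :=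
  if PySem.Str.startswith item.1 "source/" then d
  else
    (pvB_keywords (((PySem.Str.split? item.1 "/").getD []).getLastD "")).foldl
      (fun d kw => d.modify (PySem.Str.lower kw) [] (fun l => l ++ [(item.1, item.2)])) d

-- Python's min on the (never empty) group, key (-count, tag); the getD default is never used.
def build_keyword_map_alt (vocabulary : List (String × Int)) : List (String × String) :=
  let groups := (PySem.Dict.ofList vocabulary).items.foldl pvB_group PySem.Dict.empty
  groups.items.map (fun g =>
    (g.1, ((PySem.List.min2? g.2 (fun tc => -tc.2) (fun tc => tc.1)).getD ("", 0)).1))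

-- ===== PRECONDITION & SPEC =====
def Spec_build_keyword_map (vocabulary : List (String × Int)) (out : List (String × String)) : Prop := out = build_keyword_map_alt vocabulary
instance (vocabulary : List (String × Int)) (out : List (String × String)) : Decidable (Spec_build_keyword_map vocabulary out) := by unfold Spec_build_keyword_map; infer_instance

-- ===== CLAIM (what is proved, stated in full; the proofs are below) =====
def Claim_equal_build_keyword_map : Prop := ∀ (vocabulary : List (String × Int)), Dom_build_keyword_map vocabulary → Spec_build_keyword_map vocabulary (build_keyword_map vocabulary)

-- ===== LEMMAS AND PROOFS =====

-- The flat candidate list: one (lowercased keyword, (tag, count)) triple per keyword occurrence.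
def pvCands (items : List (String × Int)) : List (String × (String × Int)) :=
  items.flatMap (fun it =>
    if PySem.Str.startswith it.1 "source/" then []
    else (pvB_keywords (((PySem.Str.split? it.1 "/").getD []).getLastD "")).map
      (fun kw => (PySem.Str.lower kw, it)))

-- A's per-candidate step on the flat list.
def pvStepA (b : PySem.Dict String (String × Int)) (c : String × (String × Int)) :
    PySem.Dict String (String × Int) :=
  if b.contains c.1 = false then b.insert c.1 c.2
  else
    let ex := b.getD c.1 ("", 0)
    if c.2.2 > ex.2 ∨ (c.2.2 = ex.2 ∧ c.2.1 < ex.1) then b.insert c.1 c.2 else b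

-- A's update rule on the optional current best value of one keyword.
def pvUpd (o : Option (String × Int)) (tc : String × Int) : Option (String × Int) :=
  match o with
  | none => some tc
  | some m => if tc.2 > m.2 ∨ (tc.2 = m.2 ∧ tc.1 < m.1) then some tc else some m

lemma pvStepA_not_contains (d : PySem.Dict String (String × Int)) (c : String × (String × Int))
    (hcon : d.contains c.1 = false) : pvStepA d c = d.insert c.1 c.2 := by
  simp [pvStepA, hcon]

lemma pvStepA_contains (d : PySem.Dict String (String × Int)) (c : String × (String × Int))
    (hcon : d.contains c.1 = true) :
    pvStepA d c
      = if c.2.2 > (d.getD c.1 ("", 0)).2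
            ∨ (c.2.2 = (d.getD c.1 ("", 0)).2 ∧ c.2.1 < (d.getD c.1 ("", 0)).1)
        then d.insert c.1 c.2 else d := by
  simp [pvStepA, hcon]

lemma pvA_flat (items : List (String × Int)) (d : PySem.Dict String (String × Int)) :
    items.foldl pvA_step d = (pvCands items).foldl pvStepA d := by
  induction items generalizing d with
  | nil => rfl
  | cons it items ih =>
    have hstep : pvA_step d it
        = (if PySem.Str.startswith it.1 "source/" then ([] : List (String × (String × Int)))
           else (pvB_keywords (((PySem.Str.split? it.1 "/").getD []).getLastD "")).map
             (fun kw => (PySem.Str.lower kw, it))).foldl pvStepA d := by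
      by_cases hs : PySem.Str.startswith it.1 "source/" = true
      · simp only [pvA_step]; rw [if_pos hs, if_pos hs]; rfl
      · simp only [pvA_step]; rw [if_neg hs, if_neg hs]
        rw [PySem.List.foldl_append_ite_eq_filter (fun w => 3 < PySem.Str.len w)]
        rw [List.foldl_map]
        rfl
    simp only [pvCands] at ih ⊢
    rw [List.flatMap_cons, List.foldl_append, List.foldl_cons, ih, hstep]

lemma pvB_flat (items : List (String × Int)) (d : PySem.Dict String (List (String × Int))) :
    items.foldl pvB_group d
      = (pvCands items).foldl (fun d p => d.modify p.1 [] (fun l => l ++ [p.2])) d := by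
  induction items generalizing d with
  | nil => rfl
  | cons it items ih =>
    have hstep : pvB_group d it
        = (if PySem.Str.startswith it.1 "source/" then ([] : List (String × (String × Int)))
           else (pvB_keywords (((PySem.Str.split? it.1 "/").getD []).getLastD "")).map
             (fun kw => (PySem.Str.lower kw, it))).foldl
            (fun d p => d.modify p.1 [] (fun l => l ++ [p.2])) d := by
      by_cases hs : PySem.Str.startswith it.1 "source/" = true
      · simp only [pvB_group]; rw [if_pos hs, if_pos hs]; rfl
      · simp only [pvB_group]; rw [if_neg hs, if_neg hs]
        rw [List.foldl_map]
    simp only [pvCands] at ih ⊢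
    rw [List.flatMap_cons, List.foldl_append, List.foldl_cons, ih, hstep]

lemma pvA_get (l : List (String × (String × Int))) (d : PySem.Dict String (String × Int))
    (k : String) :
    (l.foldl pvStepA d).get? k
      = ((l.filter (fun c => c.1 == k)).map (·.2)).foldl pvUpd (d.get? k) := by
  induction l generalizing d with
  | nil => simp
  | cons c l ih =>
    rw [List.foldl_cons, ih]
    by_cases hk : c.1 = k
    · have hstep : (pvStepA d c).get? k = pvUpd (d.get? k) c.2 := by
        subst hk
        cases hcon : d.contains c.1 with
        | false =>
          have hnone : d.get? c.1 = none := (PySem.Dict.get?_eq_none_iff_contains d c.1).mpr hcon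
          rw [pvStepA_not_contains d c hcon, hnone, PySem.Dict.get?_insert_self]
          rfl
        | true =>
          cases hm : d.get? c.1 with
          | none => rw [PySem.Dict.get?_eq_none_iff_contains] at hm; rw [hcon] at hm; cases hm
          | some m =>
            have hgd : d.getD c.1 ("", 0) = m := by
              rw [PySem.Dict.getD_eq_get?_getD, hm]; rfl
            rw [pvStepA_contains d c hcon, hgd]
            simp only [pvUpd]
            by_cases h : c.2.2 > m.2 ∨ (c.2.2 = m.2 ∧ c.2.1 < m.1)
            · rw [if_pos h, if_pos h, PySem.Dict.get?_insert_self]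
            · rw [if_neg h, if_neg h]; exact hm
      rw [hstep]
      simp [hk]
    · have hne : k ≠ c.1 := fun h => hk h.symm
      have hstep : (pvStepA d c).get? k = d.get? k := by
        cases hcon : d.contains c.1 with
        | false => rw [pvStepA_not_contains d c hcon, PySem.Dict.get?_insert_of_ne d _ hne]
        | true =>
          rw [pvStepA_contains d c hcon]
          split_ifs with h
          · rw [PySem.Dict.get?_insert_of_ne d _ hne]
          · rfl
      rw [hstep]
      simp [hk]

lemma pvA_keys (l : List (String × (String × Int))) (d : PySem.Dict String (String × Int)) :
    (l.foldl pvStepA d).keys = PySem.Set.update d.keys (l.map (·.1)) := by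
  induction l generalizing d with
  | nil => rfl
  | cons c l ih =>
    have hstep : (pvStepA d c).keys = PySem.Set.add d.keys c.1 := by
      cases hcon : d.contains c.1 with
      | false =>
        have hnm : c.1 ∉ d.keys := fun h =>
          by rw [(PySem.Dict.contains_iff_mem_keys d c.1).mpr h] at hcon; cases hcon
        rw [PySem.Set.add_of_not_mem hnm, pvStepA_not_contains d c hcon,
          PySem.Dict.keys_insert_of_not_contains d _ hcon]
      | true =>
        have hmem : c.1 ∈ d.keys := (PySem.Dict.contains_iff_mem_keys d c.1).mp hcon
        rw [PySem.Set.add_of_mem hmem, pvStepA_contains d c hcon]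
        split_ifs with h
        · exact PySem.Dict.keys_insert_of_contains d _ hcon
        · rfl
    rw [List.foldl_cons, ih, List.map_cons, PySem.Set.update_cons, hstep]

-- A's per-keyword fold IS Python's min(pairs, key=lambda tc: (-tc[1], tc[0])).
lemma pvUpd_min2 (g : List (String × Int)) :
    g.foldl pvUpd none = PySem.List.min2? g (fun tc => -tc.2) (fun tc => tc.1) := by
  unfold PySem.List.min2?
  apply PySem.List.foldl_congr_mem
  intro o tc _
  cases o with
  | none => rfl
  | some m =>
    have hb : (decide ((-tc.2 : Int) < -m.2) || (!decide ((-m.2 : Int) < -tc.2) && decide (tc.1 < m.1)))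
        = decide (tc.2 > m.2 ∨ (tc.2 = m.2 ∧ tc.1 < m.1)) := by
      by_cases h2 : tc.1 < m.1 <;>
        rcases lt_trichotomy tc.2 m.2 with h | h | h <;>
          simp [h2, h, ne_of_lt, ne_of_gt, not_lt_of_gt]
    simp only [pvUpd, hb, decide_eq_true_eq]

-- The whole equivalence, over the shared flat candidate list.
lemma pvMain (items : List (String × Int)) :
    (items.foldl pvA_step PySem.Dict.empty).items.map (fun p => (p.1, p.2.1))
      = (items.foldl pvB_group PySem.Dict.empty).items.map (fun g =>
          (g.1, ((PySem.List.min2? g.2 (fun tc => -tc.2) (fun tc => tc.1)).getD ("", 0)).1)) := by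
  rw [pvA_flat, pvB_flat]
  have hAkeys : ((pvCands items).foldl pvStepA PySem.Dict.empty).keys
      = PySem.Set.ofList ((pvCands items).map (·.1)) := by
    rw [pvA_keys, PySem.Dict.keys_empty, PySem.Set.update_nil_left]
  have hBkeys : ((pvCands items).foldl (fun d p => d.modify p.1 [] (fun l => l ++ [p.2]))
        PySem.Dict.empty).keys
      = PySem.Set.ofList ((pvCands items).map (·.1)) := by
    rw [PySem.Dict.keys_foldl_modify_key (pvCands items) (fun p => p.1) []
      (fun _ p => fun l => l ++ [p.2]), PySem.Dict.keys_empty, PySem.Set.update_nil_left]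
  have hAnd : ((pvCands items).foldl pvStepA PySem.Dict.empty).keys.Nodup := by
    rw [hAkeys]; exact PySem.Set.nodup_ofList _
  have hBnd : ((pvCands items).foldl (fun d p => d.modify p.1 [] (fun l => l ++ [p.2]))
      PySem.Dict.empty).keys.Nodup := by
    rw [hBkeys]; exact PySem.Set.nodup_ofList _
  rw [PySem.Dict.items_eq_map_keys _ hAnd ("", 0), PySem.Dict.items_eq_map_keys _ hBnd [],
    hAkeys, hBkeys, List.map_map, List.map_map]
  apply List.map_congr_left
  intro k _
  have h1 : ((pvCands items).foldl pvStepA PySem.Dict.empty).getD k ("", 0)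
      = ((((pvCands items).filter (fun c => c.1 == k)).map (·.2)).foldl pvUpd none).getD ("", 0) := by
    rw [PySem.Dict.getD_eq_get?_getD, pvA_get, PySem.Dict.get?_empty]
  have h2 : ((pvCands items).foldl (fun d p => d.modify p.1 [] (fun l => l ++ [p.2]))
        PySem.Dict.empty).getD k []
      = ((pvCands items).filter (fun c => c.1 == k)).map (·.2) := by
    rw [PySem.Dict.getD_foldl_modify_append, PySem.Dict.getD_empty, List.nil_append]
  simp only [Function.comp, h1, h2, pvUpd_min2]

-- ===== VERDICT (by name: the statement is the Claim_ definition above) =====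
theorem build_keyword_map_spec : Claim_equal_build_keyword_map := by
  intro v _
  show build_keyword_map v = build_keyword_map_alt v
  unfold build_keyword_map build_keyword_map_alt
  exact pvMain _
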